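-- pv_equiv track=rewrite | github.com/DoTheBestMayB/CodingTest | 리트코드/90 Subsets 2.py | subsetsWithDupSame
-- ===== SOURCE A (Python) =====
-- from typing import List
--
-- def subsetsWithDupSame(nums: List[int]) -> List[List[int]]:
--     def get_sub(idx, sub_nums):
--         if idx >= len_nums:
--             return [[]]
--
--         s_sets = []
--
--         # check same element's length
--         same_count = 0
--         while idx + same_count < len_nums-1:
--             if sub_nums[idx + same_count] == sub_nums[idx + same_count+1]:
--                 same_count += 1
--             else:
--                 break
--
--         if same_count == 0:
--             sets = [sub_nums[idx]]
--             idx += 1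
--
--             sub_sets = get_sub(idx, sub_nums)
--             s_sets += sub_sets
--             for sub_set in sub_sets:
--                 s_sets.append(sub_set + sets)
--         else:
--             num = sub_nums[idx]
--             idx += same_count + 1
--
--             sub_sets = get_sub(idx, sub_nums)
--             s_sets += sub_sets
--
--             for i in range(same_count + 1):
--                 element = [num for _ in range(i + 1)]
--                 for sub_set in sub_sets:
--                     s_sets.append(sub_set + element)
--
--         return s_sets
--
--     nums.sort()
--     len_nums = len(nums)
--     res = get_sub(0, nums)
--
--     return res
-- ===== SOURCE B (Python) =====
-- from typing import List
--
-- def subsetsWithDupSame(nums: List[int]) -> List[List[int]]: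
--     nums.sort()
--     res = [[]]
--     i = len(nums) - 1
--     while i >= 0:
--         v = nums[i]
--         j = i - 1
--         while j >= 0 and nums[j] == v:
--             j -= 1
--         c = i - j
--         res = res + [s + [v] * k for k in range(1, c + 1) for s in res]
--         i = j
--     return res
-- ===== Notes on version B (the rewrite author's own statement) =====
-- stated objective: alternative
-- what changed: Replaces A's recursive suffix enumeration (with its ad-hoc duplicate-count lookahead) by a non-recursive back-to-front scan over the sorted list that extends the accumulated subset list with 1..c copies of each distinct value's run.
import Mathlib
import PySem

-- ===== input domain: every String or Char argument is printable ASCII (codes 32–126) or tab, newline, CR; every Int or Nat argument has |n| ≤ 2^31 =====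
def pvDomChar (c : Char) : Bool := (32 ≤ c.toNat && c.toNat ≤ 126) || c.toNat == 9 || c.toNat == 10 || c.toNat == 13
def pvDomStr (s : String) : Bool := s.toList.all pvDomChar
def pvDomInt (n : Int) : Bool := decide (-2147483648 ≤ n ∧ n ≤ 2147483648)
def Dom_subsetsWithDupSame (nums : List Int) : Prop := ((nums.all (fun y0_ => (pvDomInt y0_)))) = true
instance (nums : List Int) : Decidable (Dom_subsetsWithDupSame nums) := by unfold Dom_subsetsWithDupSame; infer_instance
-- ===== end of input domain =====

-- B replaces A's recursive group enumeration by a non-recursive back-to-front scan over the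
-- sorted list (objective: simpler / iterative). Both A and B sort `nums` in place (same side
-- effect); the theorem is about the return value.

-- ===== PORT A =====
-- A's inner while loop counting adjacent duplicates starting at index k
-- (`while idx+same_count < len_nums-1: if sub[..]==sub[..+1]: same_count += 1 else break`).
-- Indices are Nats and always in range here, so `getD _ 0` is exact for Python's `sub_nums[i]`.
def sameCountA (sub : List Int) (len k : Nat) : Nat :=
  if _h : k < len - 1 then
    if sub.getD k 0 == sub.getD (k + 1) 0 then sameCountA sub len (k + 1) + 1 else 0
  else 0
termination_by len - k
decreasing_by omega

-- A's recursive `get_sub(idx, sub_nums)` (len is the enclosing `len_nums`).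
def getSubA (sub : List Int) (len idx : Nat) : List (List Int) :=
  if _h : len ≤ idx then [[]]
  else
    let sc := sameCountA sub len idx
    if sc = 0 then
      let sets := [sub.getD idx 0]
      let subSets := getSubA sub len (idx + 1)
      subSets ++ subSets.map (fun s => s ++ sets)
    else
      let num := sub.getD idx 0
      let subSets := getSubA sub len (idx + sc + 1)
      subSets ++ (List.range (sc + 1)).flatMap
        (fun i => subSets.map (fun s => s ++ List.replicate (i + 1) num))
termination_by len - idx
decreasing_by all_goals omega

def subsetsWithDupSame (nums : List Int) : List (List Int) :=
  let s := PySem.List.sorted nums (fun x => x) false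
  getSubA s s.length 0

-- ===== PORT B =====
-- B's inner `while j >= 0 and nums[j] == v: j -= 1`; argument/result are Python's j+1
-- (so 0 means Python's j = -1).
def jFindB (xs : List Int) (v : Int) : Nat → Nat
  | 0 => 0
  | j + 1 => if xs.getD j 0 == v then jFindB xs v j else j + 1

theorem jFindB_le (xs : List Int) (v : Int) : ∀ n, jFindB xs v n ≤ n := by
  intro n
  induction n with
  | zero => simp [jFindB]
  | succ j ih => simp only [jFindB]; split <;> omega

-- B's outer `while i >= 0` loop; parameter i is Python's i+1.
def bLoop (xs : List Int) (i : Nat) (res : List (List Int)) : List (List Int) :=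
  match i with
  | 0 => res
  | j1 + 1 =>
    let v := xs.getD j1 0
    let j := jFindB xs v j1
    bLoop xs j (res ++ (List.range (j1 + 1 - j)).flatMap
      (fun k => res.map (fun s => s ++ List.replicate (k + 1) v)))
termination_by i
decreasing_by exact Nat.lt_succ_of_le (jFindB_le xs (xs.getD j1 0) j1)

def subsetsWithDupSame_alt (nums : List Int) : List (List Int) :=
  let s := PySem.List.sorted nums (fun x => x) false
  bLoop s s.length [[]]

-- ===== PRECONDITION & SPEC =====
def Spec_subsetsWithDupSame (nums : List Int) (out : List (List Int)) : Prop := out = subsetsWithDupSame_alt nums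
instance (nums : List Int) (out : List (List Int)) : Decidable (Spec_subsetsWithDupSame nums out) := by unfold Spec_subsetsWithDupSame; infer_instance

-- ===== CLAIM (what is proved, stated in full; the proofs are below) =====
def Claim_equal_subsetsWithDupSame : Prop := ∀ (nums : List Int), Dom_subsetsWithDupSame nums → Spec_subsetsWithDupSame nums (subsetsWithDupSame nums)

-- ===== LEMMAS AND PROOFS =====

set_option maxHeartbeats 1000000

-- number of leading elements of a list equal to v
def countLead (v : Int) : List Int → Nat
  | [] => 0
  | x :: xs => if x = v then countLead v xs + 1 else 0

-- the common "extend every subset by 1..c copies of v" step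
def step (v : Int) (c : Nat) (r : List (List Int)) : List (List Int) :=
  r ++ (List.range c).flatMap (fun k => r.map (fun s => s ++ List.replicate (k + 1) v))

-- reference function: fold `step` over the runs of the list, front run outermost
def specG (t : List Int) (r : List (List Int)) : List (List Int) :=
  match t with
  | [] => r
  | x :: xs => step x (countLead x xs + 1) (specG (xs.drop (countLead x xs)) r)
termination_by t.length
decreasing_by simp only [List.length_drop, List.length_cons]; omega

theorem specG_nil (r : List (List Int)) : specG [] r = r := by
  rw [specG.eq_def]

theorem specG_cons (x : Int) (xs : List Int) (r : List (List Int)) :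
    specG (x :: xs) r
      = step x (countLead x xs + 1) (specG (xs.drop (countLead x xs)) r) := by
  rw [specG.eq_def]

theorem bLoop_zero (xs : List Int) (res : List (List Int)) : bLoop xs 0 res = res := by
  simp only [bLoop]

theorem bLoop_succ (xs : List Int) (j1 : Nat) (res : List (List Int)) :
    bLoop xs (j1 + 1) res
      = bLoop xs (jFindB xs (xs.getD j1 0) j1)
          (res ++ (List.range (j1 + 1 - jFindB xs (xs.getD j1 0) j1)).flatMap
            (fun k => res.map (fun s => s ++ List.replicate (k + 1) (xs.getD j1 0)))) := by
  simp only [bLoop]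

theorem countLead_le_length (v : Int) (w : List Int) : countLead v w ≤ w.length := by
  induction w with
  | nil => simp [countLead]
  | cons x xs ih =>
    by_cases h : x = v
    · simp only [countLead, if_pos h, List.length_cons]; omega
    · simp [countLead, h]

theorem countLead_replicate (v : Int) (k : Nat) : countLead v (List.replicate k v) = k := by
  induction k with
  | zero => simp [countLead]
  | succ n ih => simp [List.replicate_succ, countLead, ih]

theorem countLead_replicate_ne (v x : Int) (k : Nat) (h : x ≠ v) (hk : 1 ≤ k) :
    countLead x (List.replicate k v) = 0 := by
  cases k with
  | zero => omega
  | succ n =>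
    rw [List.replicate_succ]
    simp only [countLead]
    rw [if_neg (fun hh => h hh.symm)]

theorem countLead_append (x : Int) (w t : List Int) :
    countLead x (w ++ t) =
      countLead x w + (if countLead x w = w.length then countLead x t else 0) := by
  induction w with
  | nil => simp [countLead]
  | cons y ys ih =>
    simp only [List.cons_append, countLead, List.length_cons]
    by_cases h : y = x
    · simp only [if_pos h, ih]
      by_cases h2 : countLead x ys = ys.length
      · rw [if_pos h2, if_pos (show countLead x ys + 1 = ys.length + 1 by omega)]
        omega
      · rw [if_neg h2, if_neg (show ¬(countLead x ys + 1 = ys.length + 1) by omega)]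
    · simp only [if_neg h]
      rw [if_neg (show ¬(0 = ys.length + 1) by omega)]

theorem countLead_eq_length_replicate (x : Int) (w : List Int)
    (h : countLead x w = w.length) : w = List.replicate w.length x := by
  induction w with
  | nil => simp
  | cons y ys ih =>
    simp only [countLead, List.length_cons] at h
    by_cases hy : y = x
    · rw [if_pos hy] at h
      have h2 := ih (by omega)
      rw [List.length_cons, hy, List.replicate_succ, ← h2]
    · rw [if_neg hy] at h
      omega

theorem getLast?_replicate_int (x : Int) (n : Nat) (h : 1 ≤ n) :
    (List.replicate n x).getLast? = some x := by
  induction n with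
  | zero => omega
  | succ m ih =>
    cases m with
    | zero => simp
    | succ m' =>
      rw [List.replicate_succ, List.replicate_succ, List.getLast?_cons_cons,
        ← List.replicate_succ]
      exact ih (by omega)

theorem getLast?_drop_of_ne_nil (l : List Int) :
    ∀ n, l.drop n ≠ [] → (l.drop n).getLast? = l.getLast? := by
  induction l with
  | nil => intro n h; simp at h
  | cons x t ih =>
    intro n h
    cases n with
    | zero => rfl
    | succ m =>
      simp only [List.drop_succ_cons] at h ⊢
      rw [ih m h]
      cases t with
      | nil => simp at h
      | cons y t' => rw [List.getLast?_cons_cons]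

theorem sameCountA_eq_countLead (s : List Int) :
    ∀ n k, s.length - k = n → k < s.length →
      sameCountA s s.length k = countLead (s.getD k 0) (s.drop (k + 1)) := by
  intro n
  induction n with
  | zero => intro k h1 h2; omega
  | succ n ih =>
    intro k h1 h2
    rw [sameCountA]
    by_cases hk : k < s.length - 1
    · rw [dif_pos hk]
      have hk1 : k + 1 < s.length := by omega
      have hdrop : s.drop (k + 1) = s[k + 1] :: s.drop (k + 1 + 1) :=
        List.drop_eq_getElem_cons hk1
      have hg1 : s.getD (k + 1) 0 = s[k + 1] := List.getD_eq_getElem s 0 hk1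
      by_cases he : s.getD k 0 = s.getD (k + 1) 0
      · have hbeq : (s.getD k 0 == s.getD (k + 1) 0) = true := beq_iff_eq.mpr he
        rw [if_pos hbeq, hdrop, he, hg1]
        have h5 := ih (k + 1) (by omega) hk1
        rw [hg1] at h5
        simp [countLead, h5]
      · have hne : ¬(s[k + 1] = s.getD k 0) := by
          intro hh
          exact he (by rw [hg1]; exact hh.symm)
        rw [if_neg (fun hh => he (beq_iff_eq.mp hh)), hdrop]
        simp only [countLead]
        rw [if_neg hne]
    · rw [dif_neg hk]
      have hge : s.length ≤ k + 1 := by omega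
      rw [List.drop_eq_nil_of_le hge]
      simp [countLead]

theorem getSubA_eq_specG (s : List Int) :
    ∀ n idx, s.length - idx ≤ n → getSubA s s.length idx = specG (s.drop idx) [[]] := by
  intro n
  induction n with
  | zero =>
    intro idx h
    have hle : s.length ≤ idx := by omega
    rw [getSubA, dif_pos hle, List.drop_eq_nil_of_le hle, specG_nil]
  | succ n ih =>
    intro idx h
    by_cases hle : s.length ≤ idx
    · rw [getSubA, dif_pos hle, List.drop_eq_nil_of_le hle, specG_nil]
    · have hidx : idx < s.length := by omega
      have hsc := sameCountA_eq_countLead s (s.length - idx) idx rfl hidx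
      have hdrop : s.drop idx = s[idx] :: s.drop (idx + 1) := List.drop_eq_getElem_cons hidx
      have hg : s.getD idx 0 = s[idx] := List.getD_eq_getElem s 0 hidx
      rw [getSubA, dif_neg hle]
      show (if sameCountA s s.length idx = 0 then
              getSubA s s.length (idx + 1) ++
                (getSubA s s.length (idx + 1)).map (fun t => t ++ [s.getD idx 0])
            else
              getSubA s s.length (idx + sameCountA s s.length idx + 1) ++
                (List.range (sameCountA s s.length idx + 1)).flatMap
                  (fun i => (getSubA s s.length (idx + sameCountA s s.length idx + 1)).map
                    (fun t => t ++ List.replicate (i + 1) (s.getD idx 0))))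
          = specG (s.drop idx) [[]]
      rw [hdrop, specG_cons]
      rw [hg] at hsc
      rw [← hsc]
      have hdd : (s.drop (idx + 1)).drop (sameCountA s s.length idx)
          = s.drop (idx + sameCountA s s.length idx + 1) := by
        rw [List.drop_drop]; congr 1; omega
      rw [hdd]
      by_cases h0 : sameCountA s s.length idx = 0
      · rw [if_pos h0, h0]
        rw [show idx + 0 + 1 = idx + 1 by omega]
        rw [ih (idx + 1) (by omega), hg]
        simp [step, List.range_one]
      · rw [if_neg h0]
        rw [ih (idx + sameCountA s s.length idx + 1) (by omega), hg]
        rfl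

theorem take_eq_append_replicate (s : List Int) (v : Int) :
    ∀ n j, j ≤ n → n ≤ s.length → (∀ m, j ≤ m → m < n → s.getD m 0 = v) →
      s.take n = s.take j ++ List.replicate (n - j) v := by
  intro n
  induction n with
  | zero =>
    intro j h1 _ _
    have : j = 0 := by omega
    simp [this]
  | succ n ih =>
    intro j h1 h2 h3
    by_cases hj : j = n + 1
    · simp [hj]
    · have hjn : j ≤ n := by omega
      have hn : n < s.length := by omega
      have hlast : s.getD n 0 = v := h3 n hjn (by omega)
      have hg : s[n]? = some v := by
        rw [List.getElem?_eq_getElem hn, ← List.getD_eq_getElem s 0 hn, hlast]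
      rw [List.take_add_one, hg]
      rw [ih j hjn (by omega) (fun m hm1 hm2 => h3 m hm1 (by omega))]
      rw [show n + 1 - j = (n - j) + 1 by omega, List.replicate_succ']
      simp

theorem specG_replicate (v : Int) (c : Nat) (r : List (List Int)) (hc : 1 ≤ c) :
    specG (List.replicate c v) r = step v c r := by
  cases c with
  | zero => omega
  | succ c' =>
    rw [List.replicate_succ, specG_cons, countLead_replicate,
      List.drop_eq_nil_of_le (by simp), specG_nil]

theorem specG_peel (v : Int) (c : Nat) (hc : 1 ≤ c) :
    ∀ (n : Nat) (u : List Int) (r : List (List Int)), u.length ≤ n →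
      (u = [] ∨ u.getLast? ≠ some v) →
      specG (u ++ List.replicate c v) r = specG u (step v c r) := by
  intro n
  induction n with
  | zero =>
    intro u r hlen _
    have hu : u = [] := by
      cases u with
      | nil => rfl
      | cons a b => simp at hlen
    subst hu
    rw [List.nil_append, specG_nil]
    exact specG_replicate v c r hc
  | succ n ih =>
    intro u r hlen hcond
    cases u with
    | nil =>
      rw [List.nil_append, specG_nil]
      exact specG_replicate v c r hc
    | cons x w =>
      have hwlen : w.length ≤ n := by
        simp only [List.length_cons] at hlen; omega
      have hlastu : (x :: w).getLast? ≠ some v := by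
        rcases hcond with h | h
        · simp at h
        · exact h
      have hxv : w = [] → x ≠ v := by
        intro hw; subst hw
        simp at hlastu
        exact hlastu
      have hlastw : w ≠ [] → w.getLast? ≠ some v := by
        intro hw
        cases w with
        | nil => simp at hw
        | cons y t => rw [List.getLast?_cons_cons] at hlastu; exact hlastu
      have hclen := countLead_le_length x w
      have hcl : countLead x (w ++ List.replicate c v) = countLead x w := by
        rw [countLead_append]
        by_cases hfull : countLead x w = w.length
        · have hxv2 : x ≠ v := by
            cases w with
            | nil => exact hxv rfl
            | cons y t =>
              have hw : (y :: t) = List.replicate (y :: t).length x :=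
                countLead_eq_length_replicate x (y :: t) hfull
              have hl : (y :: t).getLast? = some x := by
                rw [hw]; exact getLast?_replicate_int x _ (by simp)
              have h9 := hlastw (by simp)
              rw [hl] at h9
              intro hxveq
              exact h9 (by rw [hxveq])
          rw [countLead_replicate_ne v x c hxv2 hc]
          simp
        · simp [hfull]
      rw [List.cons_append, specG_cons, specG_cons, hcl,
        List.drop_append_of_le_length hclen]
      have hcond' : w.drop (countLead x w) = []
          ∨ (w.drop (countLead x w)).getLast? ≠ some v := by
        rcases Decidable.em (w.drop (countLead x w) = []) with hnil | hnnil
        · exact Or.inl hnil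
        · right
          rw [getLast?_drop_of_ne_nil w _ hnnil]
          exact hlastw (by intro hw; subst hw; simp at hnnil)
      rw [ih (w.drop (countLead x w)) r (by rw [List.length_drop]; omega) hcond']

theorem jFindB_all (xs : List Int) (v : Int) :
    ∀ n m, jFindB xs v n ≤ m → m < n → xs.getD m 0 = v := by
  intro n
  induction n with
  | zero => intro m _ h; omega
  | succ j ih =>
    intro m h1 h2
    rw [jFindB] at h1
    by_cases hb : (xs.getD j 0 == v) = true
    · rw [if_pos hb] at h1
      by_cases hm : m = j
      · subst hm; exact beq_iff_eq.mp hb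
      · exact ih m h1 (by omega)
    · rw [if_neg hb] at h1
      omega

theorem jFindB_bound (xs : List Int) (v : Int) :
    ∀ n, jFindB xs v n = 0 ∨ xs.getD (jFindB xs v n - 1) 0 ≠ v := by
  intro n
  induction n with
  | zero => left; rfl
  | succ j ih =>
    rw [jFindB]
    by_cases hb : (xs.getD j 0 == v) = true
    · rw [if_pos hb]; exact ih
    · rw [if_neg hb]
      right
      simp only [Nat.add_sub_cancel]
      intro hh
      exact hb (beq_iff_eq.mpr hh)

theorem getLast?_take_int (s : List Int) (j : Nat) (hj : j < s.length) :
    (s.take (j + 1)).getLast? = some (s.getD j 0) := by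
  rw [List.getLast?_eq_getElem?]
  have hlen : (s.take (j + 1)).length = j + 1 := by
    rw [List.length_take]; omega
  rw [hlen]
  simp only [Nat.add_sub_cancel]
  rw [List.getElem?_take, if_pos (by omega : j < j + 1)]
  rw [List.getElem?_eq_getElem hj, List.getD_eq_getElem s 0 hj]

theorem bLoop_eq_specG (s : List Int) :
    ∀ n i r, i ≤ n → i ≤ s.length → bLoop s i r = specG (s.take i) r := by
  intro n
  induction n with
  | zero =>
    intro i r h1 _
    have h0 : i = 0 := by omega
    subst h0
    rw [bLoop_zero, List.take_zero, specG_nil]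
  | succ n ih =>
    intro i r h1 h2
    cases i with
    | zero => rw [bLoop_zero, List.take_zero, specG_nil]
    | succ i1 =>
      have hi1 : i1 < s.length := by omega
      have hjle : jFindB s (s.getD i1 0) i1 ≤ i1 := jFindB_le s (s.getD i1 0) i1
      have hall : ∀ m, jFindB s (s.getD i1 0) i1 ≤ m → m < i1 + 1 → s.getD m 0 = s.getD i1 0 := by
        intro m hm1 hm2
        by_cases hm : m = i1
        · subst hm; rfl
        · exact jFindB_all s (s.getD i1 0) i1 m hm1 (by omega)
      have htake : s.take (i1 + 1)
          = s.take (jFindB s (s.getD i1 0) i1)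
            ++ List.replicate (i1 + 1 - jFindB s (s.getD i1 0) i1) (s.getD i1 0) :=
        take_eq_append_replicate s (s.getD i1 0) (i1 + 1) _ (by omega) h2 hall
      have hcond : s.take (jFindB s (s.getD i1 0) i1) = []
          ∨ (s.take (jFindB s (s.getD i1 0) i1)).getLast? ≠ some (s.getD i1 0) := by
        rcases Nat.eq_zero_or_pos (jFindB s (s.getD i1 0) i1) with hz | hpos
        · left; rw [hz, List.take_zero]
        · right
          have hj' : jFindB s (s.getD i1 0) i1 - 1 < s.length := by omega
          have hgl := getLast?_take_int s (jFindB s (s.getD i1 0) i1 - 1) hj'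
          rw [show jFindB s (s.getD i1 0) i1 - 1 + 1 = jFindB s (s.getD i1 0) i1 by omega]
            at hgl
          rw [hgl]
          rcases jFindB_bound s (s.getD i1 0) i1 with hb | hb
          · omega
          · intro hh
            exact hb (by injection hh)
      have hpeel := specG_peel (s.getD i1 0) (i1 + 1 - jFindB s (s.getD i1 0) i1) (by omega)
        (s.take (jFindB s (s.getD i1 0) i1)).length (s.take (jFindB s (s.getD i1 0) i1)) r
        (le_refl _) hcond
      have hrec := ih (jFindB s (s.getD i1 0) i1)
        (step (s.getD i1 0) (i1 + 1 - jFindB s (s.getD i1 0) i1) r) (by omega) (by omega)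
      rw [bLoop_succ, htake, hpeel]
      exact hrec

-- ===== VERDICT (by name: the statement is the Claim_ definition above) =====
theorem subsetsWithDupSame_spec : Claim_equal_subsetsWithDupSame := by
  intro nums _
  unfold Spec_subsetsWithDupSame subsetsWithDupSame subsetsWithDupSame_alt
  show getSubA (PySem.List.sorted nums (fun x => x) false)
      (PySem.List.sorted nums (fun x => x) false).length 0
    = bLoop (PySem.List.sorted nums (fun x => x) false)
      (PySem.List.sorted nums (fun x => x) false).length [[]]
  rw [getSubA_eq_specG (PySem.List.sorted nums (fun x => x) false)
      (PySem.List.sorted nums (fun x => x) false).length 0 (by omega)]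
  rw [bLoop_eq_specG (PySem.List.sorted nums (fun x => x) false)
      (PySem.List.sorted nums (fun x => x) false).length
      (PySem.List.sorted nums (fun x => x) false).length [[]] (le_refl _) (le_refl _)]
  rw [List.drop_zero, List.take_length]
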